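-- pv_equiv track=rewrite | github.com/Jessee-G/Align-then-Slide | stage1_align.py | optimal_align_via_dp
-- ===== SOURCE A (Python) =====
-- def optimal_align_via_dp(matrix):
--     if not matrix or not matrix[0]:
--         return 0, []
--
--     m = len(matrix)
--     n = len(matrix[0])
--
--     prev_dp = [-float('inf')] * m
--     prev_dp[0] = matrix[0][0]
--     predecessor = [[-1] * m for _ in range(n)]
--
--     for y in range(1, n):
--         curr_dp = [-float('inf')] * m
--         current_predecessor = [-1] * m
--
--         max_prev = prev_dp[0]
--         curr_dp[0] = matrix[0][y] + max_prev
--         current_predecessor[0] = 0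
--
--         max_x = 0
--         for x in range(1, m):
--             if prev_dp[x] > max_prev:
--                 max_prev = prev_dp[x]
--                 max_x = x
--             curr_dp[x] = matrix[x][y] + max_prev
--             current_predecessor[x] = max_x
--
--         prev_dp = curr_dp
--         predecessor[y] = current_predecessor
--
--     path = []
--     current_x, current_y = m - 1, n - 1
--     path.append((current_x, current_y))
--
--     while current_y > 0:
--         current_x = predecessor[current_y][current_x]
--         current_y -= 1
--         path.append((current_x, current_y))
--
--     path.reverse()
--     return prev_dp[m - 1], path
-- ===== SOURCE B (Python) =====
-- from itertools import accumulate
--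
--
-- def optimal_align_via_dp(matrix):
--     if not matrix or not matrix[0]:
--         return 0, []
--     m, n = len(matrix), len(matrix[0])
--     if n == 1:
--         return matrix[0][0], [(0, 0)]
--     # dp columns for y = 1 .. n-1 (column 0 only starts at row 0, so
--     # column 1 is simply matrix[x][1] + matrix[0][0] for every row x)
--     cols = [[row[1] + matrix[0][0] for row in matrix]]
--     for y in range(2, n):
--         pref = list(accumulate(cols[-1], max))
--         cols.append([row[y] + p for row, p in zip(matrix, pref)])
--     # backtrack without a predecessor table: the predecessor of row x in
--     # column y+1 is the leftmost maximum of dp column y over rows 0..x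
--     path = [(m - 1, n - 1)]
--     x = m - 1
--     for y in range(n - 2, 0, -1):
--         col = cols[y - 1]
--         x = col.index(max(col[:x + 1]))
--         path.append((x, y))
--     path.append((0, 0))
--     path.reverse()
--     return cols[-1][m - 1], path
-- ===== Notes on version B (the rewrite author's own statement) =====
-- stated objective: alternative
-- what changed: Replaces A's per-cell running max/argmax state and m-by-n predecessor table with per-column prefix maxima via itertools.accumulate and a backtrack that recomputes each leftmost prefix argmax directly from the stored dp columns with index/max; the first dp column is formed in closed form, so no -inf sentinels are needed.
-- outside the precondition, e.g. on optimal_align_via_dp([[1], [2]]): A returns (-inf, [(1, 0)]), B returns (1, [(0, 0)])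
import Mathlib
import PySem

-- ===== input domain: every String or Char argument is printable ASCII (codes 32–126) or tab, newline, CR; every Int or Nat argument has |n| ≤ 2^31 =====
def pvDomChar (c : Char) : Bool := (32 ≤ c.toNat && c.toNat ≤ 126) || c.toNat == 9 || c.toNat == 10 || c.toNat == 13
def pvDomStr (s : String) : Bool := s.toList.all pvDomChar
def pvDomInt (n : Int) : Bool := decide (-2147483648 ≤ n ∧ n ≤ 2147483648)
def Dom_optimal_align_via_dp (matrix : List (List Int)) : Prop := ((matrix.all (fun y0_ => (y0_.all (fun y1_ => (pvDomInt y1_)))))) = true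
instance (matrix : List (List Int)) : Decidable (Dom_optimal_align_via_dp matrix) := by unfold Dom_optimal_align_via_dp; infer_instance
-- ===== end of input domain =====

-- B replaces A's running max/argmax state and m×n predecessor table by per-column prefix
-- maxima (itertools.accumulate) plus a backtrack that recomputes each leftmost prefix
-- argmax from the stored dp columns; same cost, genuinely different bookkeeping.

-- ===== PORT A =====
-- Python mixes float('-inf') sentinels with ints in prev_dp; modelled as Option Int
-- (none = -inf), exact for every comparison this program performs on Pre_ inputs.
def pvOGt (a : Option Int) (b : Int) : Bool :=
  match a with
  | none => false
  | some v => decide (b < v)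

def pvAXgo (y : Nat) (maxPrev : Int) (maxX : Int) (x : Int) :
    List (Option Int) → List (List Int) → List (Option Int) × List Int
  | [], _ => ([], [])
  | _ :: _, [] => ([], [])
  | pv :: ps, row :: rows =>
    let mp := if pvOGt pv maxPrev then pv.getD 0 else maxPrev
    let mx := if pvOGt pv maxPrev then x else maxX
    let res := pvAXgo y mp mx (x + 1) ps rows
    (some (row.getD y 0 + mp) :: res.1, mx :: res.2)

def pvAcol (matrix : List (List Int)) (y : Nat) (prevdp : List (Option Int)) :
    List (Option Int) × List Int :=
  let maxPrev := (prevdp.headD none).getD 0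
  let c0 := (matrix.headD []).getD y 0 + maxPrev
  let res := pvAXgo y maxPrev 0 1 prevdp.tail matrix.tail
  (some c0 :: res.1, 0 :: res.2)

def pvAYloop (matrix : List (List Int)) : Nat → Nat → List (Option Int) →
    List (Option Int) × List (List Int)
  | _, 0, prevdp => (prevdp, [])
  | y, k + 1, prevdp =>
    let st := pvAcol matrix y prevdp
    let rest := pvAYloop matrix (y + 1) k st.1
    (rest.1, st.2 :: rest.2)

def pvAback (predCols : List (List Int)) : Nat → Int → List (Int × Int)
  | 0, _ => []
  | y + 1, cx =>
    let nx := (PySem.List.pyGet? (predCols.getD y []) cx).getD (-1)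
    (nx, (y : Int)) :: pvAback predCols y nx

def optimal_align_via_dp (matrix : List (List Int)) : Int × (List (Int × Int)) :=
  if matrix.isEmpty || (matrix.headD []).isEmpty then (0, [])
  else
    let m := matrix.length
    let n := (matrix.headD []).length
    let prevdp0 := (List.replicate m (none : Option Int)).set 0 (some ((matrix.headD []).getD 0 0))
    let res := pvAYloop matrix 1 (n - 1) prevdp0
    let path := (((m : Int) - 1, (n : Int) - 1) :: pvAback res.2 (n - 1) ((m : Int) - 1))
    ((res.1.getD (m - 1) none).getD 0, path.reverse)

-- ===== PORT B =====
def pvAccumMax : List Int → List Int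
  | [] => []
  | h :: t => List.scanl max h t

def pvBcols (matrix : List (List Int)) : Nat → Nat → List Int → List (List Int)
  | _, 0, prev => [prev]
  | y, k + 1, prev =>
    let pref := pvAccumMax prev
    let next := (matrix.zip pref).map (fun p => p.1.getD y 0 + p.2)
    prev :: pvBcols matrix (y + 1) k next

def pvBback (cols : List (List Int)) : Nat → Nat → List (Int × Int)
  | 0, _ => []
  | y + 1, x =>
    let col := cols.getD y []
    let v := (PySem.List.max? (col.take (x + 1)) (fun z => z)).getD 0
    let nx := (PySem.List.index? col v).getD 0
    ((nx : Int), (y : Int) + 1) :: pvBback cols y nx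

def optimal_align_via_dp_alt (matrix : List (List Int)) : Int × (List (Int × Int)) :=
  if matrix.isEmpty || (matrix.headD []).isEmpty then (0, [])
  else
    let m := matrix.length
    let n := (matrix.headD []).length
    if n = 1 then ((matrix.headD []).getD 0 0, [(0, 0)])
    else
      let col1 := matrix.map (fun row => row.getD 1 0 + (matrix.headD []).getD 0 0)
      let cols := pvBcols matrix 2 (n - 2) col1
      let path := ((m : Int) - 1, (n : Int) - 1) :: pvBback cols (n - 2) (m - 1) ++ [((0 : Int), (0 : Int))]
      ((cols.getLastD []).getD (m - 1) 0, path.reverse)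

-- ===== PRECONDITION & SPEC =====
-- Pre_ excludes (a) matrices with several rows but a single column, where A returns
-- float -inf (not an int), and (b) ragged matrices with a row shorter than the first,
-- where A raises IndexError.
def Pre_optimal_align_via_dp (matrix : List (List Int)) : Prop :=
  matrix = [] ∨ (matrix.headD []) = [] ∨
    (((matrix.headD []).length = 1 → matrix.length = 1) ∧
      ∀ row ∈ matrix, (matrix.headD []).length ≤ row.length)
instance (matrix : List (List Int)) : Decidable (Pre_optimal_align_via_dp matrix) := by
  unfold Pre_optimal_align_via_dp; infer_instance

def pvWitness_optimal_align_via_dp : List (List Int) := [[1, 2], [3, 4]]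

def Spec_optimal_align_via_dp (matrix : List (List Int)) (out : Int × (List (Int × Int))) : Prop := out = optimal_align_via_dp_alt matrix
instance (matrix : List (List Int)) (out : Int × (List (Int × Int))) : Decidable (Spec_optimal_align_via_dp matrix out) := by unfold Spec_optimal_align_via_dp; infer_instance

-- ===== CLAIM (what is proved, stated in full; the proofs are below) =====
def Claim_equal_optimal_align_via_dp : Prop := ∀ (matrix : List (List Int)), Dom_optimal_align_via_dp matrix → Pre_optimal_align_via_dp matrix → Spec_optimal_align_via_dp matrix (optimal_align_via_dp matrix)

-- ===== LEMMAS AND PROOFS =====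
def pvRun (mp mx x : Int) : List Int → List (Int × Int)
  | [] => []
  | a :: t => if mp < a then (a, x) :: pvRun a x (x + 1) t else (mp, mx) :: pvRun mp mx (x + 1) t

def pvPredColOf : List Int → List Int
  | [] => []
  | h :: t => 0 :: (pvRun h 0 1 t).map (·.2)

theorem pvScanl_eq_run (t : List Int) (mp mx x : Int) :
    List.scanl max mp t = mp :: (pvRun mp mx x t).map (·.1) := by
  induction t generalizing mp mx x with
  | nil => simp [pvRun]
  | cons a t ih =>
    simp only [List.scanl_cons, pvRun]
    split_ifs with h
    · rw [max_eq_right h.le]; simp [ih a x (x+1)]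
    · rw [max_eq_left (not_lt.1 h)]; simp [ih mp mx (x+1)]

theorem pvAXgo_eq_run (l : List Int) (rows : List (List Int)) (y : Nat) (mp mx x : Int)
    (h : l.length = rows.length) :
    pvAXgo y mp mx x (l.map some) rows =
      (((pvRun mp mx x l).zip rows).map (fun p => some (p.2.getD y 0 + p.1.1)),
       (pvRun mp mx x l).map (·.2)) := by
  induction l generalizing rows mp mx x with
  | nil => cases rows with
    | nil => simp [pvAXgo, pvRun]
    | cons r rs => simp at h
  | cons a t ih =>
    cases rows with
    | nil => simp at h
    | cons r rs =>
      simp only [List.length_cons, Nat.add_right_cancel_iff] at h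
      simp only [List.map_cons, pvAXgo, pvOGt, pvRun]
      by_cases hc : mp < a
      · simp [hc, ih rs a x (x+1) h]
      · simp [hc, ih rs mp mx (x+1) h]

theorem pvAXgo_none (rows : List (List Int)) (y : Nat) (mp mx x : Int) :
    pvAXgo y mp mx x (List.replicate rows.length none) rows =
      (rows.map (fun r => some (r.getD y 0 + mp)), List.replicate rows.length mx) := by
  induction rows generalizing mx x with
  | nil => simp [pvAXgo]
  | cons r rs ih => simp [List.replicate_succ, pvAXgo, pvOGt, ih]

theorem pvZipSwap (run : List (Int × Int)) (rows : List (List Int)) (y : Nat) :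
    (run.zip rows).map (fun p => some (p.2.getD y 0 + p.1.1)) =
      (rows.zip (run.map (·.1))).map (fun p => (some (p.1.getD y 0 + p.2) : Option Int)) := by
  induction run generalizing rows with
  | nil => simp
  | cons a t ih =>
    cases rows with
    | nil => simp
    | cons r rs =>
      simp only [List.zip_cons_cons, List.map_cons]
      rw [ih rs]

theorem pvColStep (matrix : List (List Int)) (y : Nat) (h : Int) (tl : List Int)
    (hlen : matrix.length = tl.length + 1) :
    pvAcol matrix y ((h :: tl).map some) =
      (((matrix.zip (pvAccumMax (h :: tl))).map (fun p => p.1.getD y 0 + p.2)).map some,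
       pvPredColOf (h :: tl)) := by
  cases matrix with
  | nil => simp at hlen
  | cons r0 rs =>
    simp only [List.length_cons, Nat.add_right_cancel_iff] at hlen
    simp only [pvAcol, pvAccumMax, pvPredColOf, List.map_cons, List.headD_cons,
      Option.getD_some, List.tail_cons,
      pvAXgo_eq_run tl rs y h 0 1 (by omega), pvScanl_eq_run tl h 0 1,
      List.zip_cons_cons, Prod.mk.injEq]
    refine ⟨?_, trivial⟩
    rw [pvZipSwap (pvRun h 0 1 tl) rs y, List.map_map]
    rfl

theorem pvFirstCol (r0 : List Int) (rs : List (List Int)) :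
    pvAcol (r0 :: rs) 1 (some (r0.getD 0 0) :: List.replicate rs.length none) =
      (((r0 :: rs).map (fun row => row.getD 1 0 + r0.getD 0 0)).map some,
       List.replicate (rs.length + 1) 0) := by
  simp only [pvAcol, List.headD_cons, Option.getD_some, List.replicate_succ, List.tail_cons,
    List.map_cons, List.map_map, pvAXgo_none rs 1 (r0.getD 0 0) 0 1, Prod.mk.injEq]
  exact ⟨rfl, trivial⟩

theorem pvAccumMax_length (l : List Int) : (pvAccumMax l).length = l.length := by
  cases l <;> simp [pvAccumMax]

theorem pvBcols_ne_nil (matrix : List (List Int)) (y k : Nat) (prev : List Int) :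
    pvBcols matrix y k prev ≠ [] := by
  cases k <;> simp [pvBcols]

theorem pvBcols_mem_length (matrix : List (List Int)) (k : Nat) :
    ∀ (y : Nat) (prev : List Int), prev.length = matrix.length →
    ∀ c ∈ pvBcols matrix y k prev, c.length = matrix.length := by
  induction k with
  | zero =>
    intro y prev hl c hc
    have hcp : c = prev := by simpa [pvBcols] using hc
    rw [hcp]; exact hl
  | succ k ih =>
    intro y prev hl c hc
    simp only [pvBcols, List.mem_cons] at hc
    rcases hc with rfl | hc
    · exact hl
    · exact ih (y + 1) _ (by simp [pvAccumMax_length, hl]) c hc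

theorem pvYloop (matrix : List (List Int)) (k : Nat) :
    ∀ (y : Nat) (prev : List Int), prev.length = matrix.length → prev ≠ [] →
    pvAYloop matrix y k (prev.map some) =
      (((pvBcols matrix y k prev).getLastD []).map some,
       ((pvBcols matrix y k prev).dropLast).map pvPredColOf) := by
  induction k with
  | zero => intro y prev _ _; simp [pvAYloop, pvBcols]
  | succ k ih =>
    intro y prev hl hne
    obtain ⟨h, tl, rfl⟩ : ∃ h tl, prev = h :: tl := by
      cases prev with
      | nil => exact absurd rfl hne
      | cons a t => exact ⟨a, t, rfl⟩
    have hml : matrix.length = tl.length + 1 := by simpa using hl.symm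
    have hstep := pvColStep matrix y h tl hml
    simp only [pvAYloop, pvBcols, hstep]
    set N := (matrix.zip (pvAccumMax (h :: tl))).map (fun p => p.1.getD y 0 + p.2) with hN
    have hNl : N.length = matrix.length := by
      simp [hN, List.length_zip, pvAccumMax_length, hl]
    have hNne : N ≠ [] := by
      have : 0 < matrix.length := by omega
      intro hc; rw [hc] at hNl; simp at hNl; omega
    rw [ih (y + 1) N hNl hNne]
    have hR := pvBcols_ne_nil matrix (y + 1) k N
    obtain ⟨r, R, hRR⟩ : ∃ r R, pvBcols matrix (y + 1) k N = r :: R := by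
      cases hq : pvBcols matrix (y + 1) k N with
      | nil => exact absurd hq hR
      | cons a t => exact ⟨a, t, rfl⟩
    rw [hRR]
    simp only [List.getLastD_cons, List.dropLast_cons₂, List.map_cons]

theorem pvMaxTakeSucc (col : List Int) (k : Nat) (a mp : Int)
    (hget : col[k]? = some a)
    (hm : PySem.List.max? (col.take k) (fun z => z) = some mp) :
    PySem.List.max? (col.take (k + 1)) (fun z => z) = some (max mp a) := by
  have htake : col.take (k + 1) = col.take k ++ [a] := by
    rw [List.take_add_one, hget]; rfl
  obtain ⟨x, t, hxt⟩ : ∃ x t, col.take k = x :: t := by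
    cases hq : col.take k with
    | nil => rw [hq] at hm; simp [PySem.List.max?] at hm
    | cons x t => exact ⟨x, t, rfl⟩
  rw [hxt, PySem.List.max?_id_cons] at hm
  rw [htake, hxt, List.cons_append, PySem.List.max?_id_cons, List.foldl_append]
  simp only [List.foldl_cons, List.foldl_nil]
  rw [Option.some_inj.1 hm]

theorem pvRunSpec (t : List Int) :
    ∀ (col : List Int) (k : Nat) (mp : Int) (mx : Nat),
    col.drop (k + 1) = t →
    PySem.List.max? (col.take (k + 1)) (fun z => z) = some mp →
    PySem.List.index? col mp = some mx →
    ∀ j, j < t.length → ∃ i : Nat,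
      PySem.List.index? col ((PySem.List.max? (col.take (k + 1 + j + 1)) (fun z => z)).getD 0) = some i ∧
      (pvRun mp (mx : Int) ((k : Int) + 1) t).getD j (0, 0) =
        ((PySem.List.max? (col.take (k + 1 + j + 1)) (fun z => z)).getD 0, (i : Int)) := by
  induction t with
  | nil => intro col k mp mx _ _ _ j hj; simp at hj
  | cons a t' ih =>
    intro col k mp mx hdrop hm hidx j hj
    have hget : col[k + 1]? = some a := by
      have h0 := congrArg (fun l : List Int => l[0]?) hdrop
      simpa using h0
    have hlt : k + 1 < col.length := by
      have := List.getElem?_eq_some_iff.1 hget; exact this.1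
    have hdrop' : col.drop (k + 2) = t' := by
      have h1 : col.drop (k + 2) = (col.drop (k + 1)).drop 1 := by
        rw [List.drop_drop]
      rw [h1, hdrop]; rfl
    have hmax2 := pvMaxTakeSucc col (k + 1) a mp hget hm
    have hub : ∀ z ∈ col.take (k + 1), z ≤ mp := by
      intro z hz; exact PySem.List.max?_isMax hm z hz
    by_cases hc : mp < a
    · -- the running max improves at row k+1
      have hidx2 : PySem.List.index? col a = some (k + 1) := by
        rw [PySem.List.index?_eq_some_iff]
        refine ⟨col.take (k + 1), t', ?_, ?_, ?_⟩
        · conv_lhs => rw [← List.take_append_drop (k + 1) col]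
          rw [hdrop]
        · simp [List.length_take]; omega
        · intro hmem; exact absurd hc (not_lt.2 (hub a hmem))
      have hmaxa : PySem.List.max? (col.take (k + 1 + 1)) (fun z => z) = some a := by
        rw [hmax2, max_eq_right hc.le]
      cases j with
      | zero =>
        refine ⟨k + 1, ?_, ?_⟩
        · rw [hmaxa]; simpa using hidx2
        · simp [pvRun, if_pos hc, hmaxa]
      | succ j =>
        have hrec := ih col (k + 1) a (k + 1) hdrop' hmaxa hidx2 j (by simpa using hj)
        obtain ⟨i, hi1, hi2⟩ := hrec
        refine ⟨i, ?_, ?_⟩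
        · have e : k + 1 + (j + 1) + 1 = k + 1 + 1 + j + 1 := by omega
          rw [e]; exact hi1
        · have e : k + 1 + (j + 1) + 1 = k + 1 + 1 + j + 1 := by omega
          rw [e]
          simp only [pvRun, if_pos hc, List.getD_cons_succ]
          rw [show ((k : Int) + 1) = ((k + 1 : Nat) : Int) from by push_cast; ring]
          exact hi2
    · -- the running max is unchanged
      have hmaxa : PySem.List.max? (col.take (k + 1 + 1)) (fun z => z) = some mp := by
        rw [hmax2, max_eq_left (not_lt.1 hc)]
      cases j with
      | zero =>
        refine ⟨mx, ?_, ?_⟩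
        · rw [hmaxa]; simpa using hidx
        · simp [pvRun, if_neg hc, hmaxa]
      | succ j =>
        have hrec := ih col (k + 1) mp mx hdrop' hmaxa hidx j (by simpa using hj)
        obtain ⟨i, hi1, hi2⟩ := hrec
        refine ⟨i, ?_, ?_⟩
        · have e : k + 1 + (j + 1) + 1 = k + 1 + 1 + j + 1 := by omega
          rw [e]; exact hi1
        · have e : k + 1 + (j + 1) + 1 = k + 1 + 1 + j + 1 := by omega
          rw [e]
          simp only [pvRun, if_neg hc, List.getD_cons_succ]
          rw [show ((k : Int) + 1) = ((k + 1 : Nat) : Int) from by push_cast; ring]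
          exact hi2

theorem pvRun_length (mp mx x : Int) (t : List Int) : (pvRun mp mx x t).length = t.length := by
  induction t generalizing mp mx x with
  | nil => rfl
  | cons a t ih => simp only [pvRun]; split <;> simp [ih]

theorem pvPredLookup (col : List Int) (hne : col ≠ []) (x : Nat) (hx : x < col.length) :
    (PySem.List.pyGet? (pvPredColOf col) (x : Int)).getD (-1) =
      (((PySem.List.index? col ((PySem.List.max? (col.take (x + 1)) (fun z => z)).getD 0)).getD 0 : Nat) : Int) ∧
    (PySem.List.index? col ((PySem.List.max? (col.take (x + 1)) (fun z => z)).getD 0)).getD 0 < col.length := by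
  obtain ⟨h, tl, rfl⟩ : ∃ h tl, col = h :: tl := by
    cases col with
    | nil => exact absurd rfl hne
    | cons a t => exact ⟨a, t, rfl⟩
  have hmax1 : PySem.List.max? ((h :: tl).take 1) (fun z => z) = some h := by
    simp [PySem.List.max?_id_cons]
  have hidx1 : PySem.List.index? (h :: tl) h = some 0 := PySem.List.index?_cons_self h tl
  cases x with
  | zero =>
    have hmax1' : PySem.List.max? ((h :: tl).take (0 + 1)) (fun z => z) = some h := hmax1
    rw [hmax1']
    simp only [Option.getD_some]
    rw [hidx1]
    refine ⟨?_, by simp⟩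
    rw [PySem.List.pyGet?_natCast]
    simp [pvPredColOf]
  | succ x' =>
    have hx' : x' < tl.length := by simpa using hx
    obtain ⟨i, hi1, hi2⟩ := pvRunSpec tl (h :: tl) 0 h 0 rfl hmax1 hidx1 x' hx'
    have e : 0 + 1 + x' + 1 = x' + 1 + 1 := by omega
    rw [e] at hi1 hi2
    simp only [Nat.cast_zero, zero_add] at hi2
    have hrl : x' < (pvRun h 0 1 tl).length := by rw [pvRun_length]; exact hx'
    rw [List.getD_eq_getElem _ _ hrl] at hi2
    have hlhs : (PySem.List.pyGet? (pvPredColOf (h :: tl)) ((x' + 1 : Nat) : Int)).getD (-1) = (i : Int) := by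
      rw [PySem.List.pyGet?_natCast]
      simp only [pvPredColOf, List.getElem?_cons_succ, List.getElem?_map]
      rw [List.getElem?_eq_getElem hrl]
      simp only [Option.map_some, Option.getD_some]
      rw [hi2]
    refine ⟨?_, ?_⟩
    · rw [hlhs, hi1]; simp
    · rw [hi1]
      obtain ⟨hk, -, -⟩ := PySem.List.getElem_of_index?_eq_some hi1
      simpa using hk

theorem pvBcols_length (matrix : List (List Int)) (k : Nat) :
    ∀ (y : Nat) (prev : List Int), (pvBcols matrix y k prev).length = k + 1 := by
  induction k with
  | zero => intro y prev; rfl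
  | succ k ih => intro y prev; simp [pvBcols, ih]

theorem pvBacktrack (cols : List (List Int)) (m : Nat)
    (hlen : ∀ c ∈ cols, c.length = m) :
    ∀ (y : Nat), y < cols.length → ∀ (x : Nat), x < m →
    pvAback (List.replicate m 0 :: cols.dropLast.map pvPredColOf) (y + 1) (x : Int) =
      pvBback cols y x ++ [((0 : Int), (0 : Int))] := by
  intro y
  induction y generalizing cols with
  | zero =>
    intro _ x hx
    simp only [pvAback, pvBback, List.getD_cons_zero]
    rw [PySem.List.pyGet?_natCast]
    rw [List.getElem?_replicate_of_lt hx]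
    simp
  | succ y ih =>
    intro hy x hx
    have hy' : y < (cols.dropLast.map pvPredColOf).length := by
      simp [List.length_dropLast]; omega
    have hylt : y < cols.length := by omega
    have hmem : cols[y] ∈ cols := List.getElem_mem _
    have hclen : (cols[y]'hylt).length = m := hlen _ hmem
    have hcne : cols[y] ≠ [] := by
      intro hc; rw [hc] at hclen; simp at hclen; omega
    have hgetP : (List.replicate m 0 :: cols.dropLast.map pvPredColOf).getD (y + 1) [] = pvPredColOf cols[y] := by
      simp only [List.getD_cons_succ]
      rw [List.getD_eq_getElem _ _ hy', List.getElem_map, List.getElem_dropLast]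
    have hgetc : cols.getD y [] = cols[y] := List.getD_eq_getElem _ _ hylt
    obtain ⟨heq, hbd⟩ := pvPredLookup cols[y] hcne x (by rw [hclen]; exact hx)
    have eA : pvAback (List.replicate m 0 :: cols.dropLast.map pvPredColOf) (y + 1 + 1) (x : Int) =
        ((PySem.List.pyGet? ((List.replicate m 0 :: cols.dropLast.map pvPredColOf).getD (y + 1) []) (x : Int)).getD (-1), ((y + 1 : Nat) : Int)) ::
          pvAback (List.replicate m 0 :: cols.dropLast.map pvPredColOf) (y + 1)
            ((PySem.List.pyGet? ((List.replicate m 0 :: cols.dropLast.map pvPredColOf).getD (y + 1) []) (x : Int)).getD (-1)) := rfl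
    have eB : pvBback cols (y + 1) x =
        ((((PySem.List.index? (cols.getD y []) ((PySem.List.max? ((cols.getD y []).take (x + 1)) (fun z => z)).getD 0)).getD 0 : Nat) : Int),
          (y : Int) + 1) ::
          pvBback cols y ((PySem.List.index? (cols.getD y []) ((PySem.List.max? ((cols.getD y []).take (x + 1)) (fun z => z)).getD 0)).getD 0) := rfl
    rw [eA, eB, hgetP, hgetc, heq, List.cons_append,
      ih cols hlen hylt _ (by rw [← hclen]; exact hbd), Nat.cast_add, Nat.cast_one]

theorem pvGetLastD_mem {α : Type} : ∀ (l : List α) (d : α), l ≠ [] → l.getLastD d ∈ l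
  | [a], _, _ => by simp
  | a :: b :: t, d, _ => by
    rw [List.getLastD_cons]
    exact List.mem_cons_of_mem a (pvGetLastD_mem (b :: t) a (by simp))

theorem pvAYloop_succ (matrix : List (List Int)) (y k : Nat) (pd : List (Option Int)) :
    pvAYloop matrix y (k + 1) pd =
      ((pvAYloop matrix (y + 1) k (pvAcol matrix y pd).1).1,
       (pvAcol matrix y pd).2 :: (pvAYloop matrix (y + 1) k (pvAcol matrix y pd).1).2) := rfl

theorem pvMapSomeGetD (l : List Int) (i : Nat) (hi : i < l.length) :
    ((l.map some).getD i none).getD 0 = l.getD i 0 := by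
  rw [List.getD_eq_getElem _ _ (by simpa using hi), List.getD_eq_getElem _ _ hi]
  simp

theorem pvMain (matrix : List (List Int)) (hpre :
    matrix = [] ∨ (matrix.headD []) = [] ∨
      (((matrix.headD []).length = 1 → matrix.length = 1) ∧
        ∀ row ∈ matrix, (matrix.headD []).length ≤ row.length)) :
    optimal_align_via_dp matrix = optimal_align_via_dp_alt matrix := by
  cases matrix with
  | nil => rfl
  | cons r0 rs =>
  cases r0 with
  | nil => rfl
  | cons c0 r0t =>
  rcases hpre with h | h | ⟨hn1, -⟩
  · exact absurd h (by simp)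
  · exact absurd h (by simp)
  cases r0t with
  | nil =>
    -- n = 1, hence a single row [c0]
    have hrs : rs = [] := by simpa using hn1 (by simp)
    subst hrs
    simp [optimal_align_via_dp, optimal_align_via_dp_alt, pvAYloop, pvAback]
  | cons c1 r0tt =>
    -- n ≥ 2
    simp only [optimal_align_via_dp, optimal_align_via_dp_alt, List.isEmpty_cons,
      List.headD_cons, List.length_cons, Bool.or_self,
      Bool.false_eq_true, if_false]
    have e1 : r0tt.length + 1 + 1 - 1 = r0tt.length + 1 := by omega
    have e2 : r0tt.length + 1 + 1 - 2 = r0tt.length := by omega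
    have e3 : rs.length + 1 - 1 = rs.length := by omega
    rw [e1, e2, e3, if_neg (by omega : ¬ (r0tt.length + 1 + 1 = 1))]
    rw [show (List.replicate (rs.length + 1) (none : Option Int)).set 0 (some ((c0 :: c1 :: r0tt).getD 0 0)) =
        some ((c0 :: c1 :: r0tt).getD 0 0) :: List.replicate rs.length none from by simp [List.replicate_succ]]
    rw [pvAYloop_succ, pvFirstCol (c0 :: c1 :: r0tt) rs]
    rw [pvYloop ((c0 :: c1 :: r0tt) :: rs) r0tt.length 2
      (((c0 :: c1 :: r0tt) :: rs).map (fun row => row.getD 1 0 + (c0 :: c1 :: r0tt).getD 0 0))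
      (by simp) (by simp)]
    dsimp only
    set cols := pvBcols ((c0 :: c1 :: r0tt) :: rs) 2 r0tt.length
        (List.map (fun row => row.getD 1 0 + (c0 :: c1 :: r0tt).getD 0 0) ((c0 :: c1 :: r0tt) :: rs)) with hcols
    have hl : ∀ c ∈ cols, c.length = rs.length + 1 := by
      intro c hc
      have := pvBcols_mem_length ((c0 :: c1 :: r0tt) :: rs) r0tt.length 2
        (List.map (fun row => row.getD 1 0 + (c0 :: c1 :: r0tt).getD 0 0) ((c0 :: c1 :: r0tt) :: rs))
        (by simp) c (by rw [← hcols]; exact hc)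
      simpa using this
    have hlast : cols.getLastD [] ∈ cols := pvGetLastD_mem cols [] (pvBcols_ne_nil _ _ _ _)
    have hlenlast : (cols.getLastD []).length = rs.length + 1 := hl _ hlast
    rw [pvMapSomeGetD _ rs.length (by rw [hlenlast]; omega)]
    rw [show ((↑(rs.length + 1) : Int) - 1) = ((rs.length : Nat) : Int) from by push_cast; ring]
    rw [pvBacktrack cols (rs.length + 1) hl r0tt.length
      (by rw [hcols, pvBcols_length]; omega) rs.length (by omega)]
    rfl

-- ===== VERDICT (by name: the statement is the Claim_ definition above) =====
theorem optimal_align_via_dp_spec : Claim_equal_optimal_align_via_dp := by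
  intro matrix _ hpre
  unfold Spec_optimal_align_via_dp
  exact pvMain matrix hpre
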